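-- pv_equiv track=rewrite | github.com/oemss/statsite | worker/main.py | find_el
-- ===== SOURCE A (Python) =====
-- def find_el(sp, sym):
--     if not sp:
--         return True
--     else:
--         if sp[0] == sym:
--             return False
--         else:
--             return find_el(sp[1:], sym)
-- ===== SOURCE B (Python) =====
-- def find_el(sp, sym):
--     for x in sp:
--         if x == sym:
--             return False
--     return True
-- ===== Notes on version B (the rewrite author's own statement) =====
-- stated objective: faster
-- what changed: Replaces A's head/tail recursion over slices (which copies the remaining sequence at every step) with a single iterative element-by-element loop that returns False on the first match.
import Mathlib
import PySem

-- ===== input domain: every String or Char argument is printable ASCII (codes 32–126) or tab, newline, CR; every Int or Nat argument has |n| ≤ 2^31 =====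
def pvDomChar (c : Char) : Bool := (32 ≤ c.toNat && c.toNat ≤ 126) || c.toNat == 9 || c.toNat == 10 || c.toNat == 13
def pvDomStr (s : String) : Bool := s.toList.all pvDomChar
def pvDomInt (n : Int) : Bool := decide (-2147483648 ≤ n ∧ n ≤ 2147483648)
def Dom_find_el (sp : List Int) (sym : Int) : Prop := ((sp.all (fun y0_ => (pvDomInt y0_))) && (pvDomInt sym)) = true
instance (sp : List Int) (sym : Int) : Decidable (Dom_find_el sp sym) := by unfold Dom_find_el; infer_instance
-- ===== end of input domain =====

-- B replaces A's head/tail recursion over slices with a single element-by-element loop; return value only, no side effects.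
-- ===== PORT A =====
def find_el (sp : List Int) (sym : Int) : Bool :=
  if _h : sp = [] then true
  else
    match PySem.List.pyGet? sp 0 with
    | some x => if x == sym then false else find_el (PySem.List.slice sp (some 1) none) sym
    | none => true  -- unreachable: sp nonempty
termination_by sp.length
decreasing_by
  rw [PySem.List.slice_from_one]
  cases sp with
  | nil => exact absurd rfl _h
  | cons a t => simp

-- ===== PORT B =====
def find_el_alt (sp : List Int) (sym : Int) : Bool :=
  match sp with
  | [] => true
  | x :: rest => if x == sym then false else find_el_alt rest sym

-- ===== PRECONDITION & SPEC =====
def Spec_find_el (sp : List Int) (sym : Int) (out : Bool) : Prop := out = find_el_alt sp sym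
instance (sp : List Int) (sym : Int) (out : Bool) : Decidable (Spec_find_el sp sym out) := by unfold Spec_find_el; infer_instance

-- ===== CLAIM (what is proved, stated in full; the proofs are below) =====
def Claim_equal_find_el : Prop := ∀ (sp : List Int) (sym : Int), Dom_find_el sp sym → Spec_find_el sp sym (find_el sp sym)

-- ===== LEMMAS AND PROOFS =====

-- ===== VERDICT (by name: the statement is the Claim_ definition above) =====
theorem find_el_eq_alt (sp : List Int) (sym : Int) : find_el sp sym = find_el_alt sp sym := by
  induction sp with
  | nil => simp [find_el, find_el_alt]
  | cons x rest ih =>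
    rw [find_el, find_el_alt]
    simp [PySem.List.pyGet?, PySem.List.pyIdx?, PySem.List.slice_from_one, ih]

theorem find_el_spec : Claim_equal_find_el := by
  intro sp sym _
  exact find_el_eq_alt sp sym
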